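-- pv_equiv track=rewrite | github.com/GHSSHG/SimVQAPP | src/simvq/chunking.py | iter_chunk_starts
-- ===== SOURCE A (Python) =====
-- CHUNK_SIZE_DEFAULT = 12288
--
-- HOP_SIZE_DEFAULT = 11688
--
-- def iter_chunk_starts(total_length: int, chunk_size: int = CHUNK_SIZE_DEFAULT, hop_size: int = HOP_SIZE_DEFAULT) -> list[int]:
--     total_length = max(0, int(total_length))
--     chunk_size = max(1, int(chunk_size))
--     hop_size = max(1, int(hop_size))
--     if total_length <= 0:
--         return []
--     if total_length <= chunk_size:
--         return [0]
--
--     starts: list[int] = []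
--     pos = 0
--     while (pos + chunk_size) <= total_length:
--         starts.append(pos)
--         pos += hop_size
--
--     last_full_end = starts[-1] + chunk_size
--     if last_full_end < total_length:
--         starts.append(starts[-1] + hop_size)
--     return starts
-- ===== SOURCE B (Python) =====
-- def iter_chunk_starts(total_length: int, chunk_size: int = 12288, hop_size: int = 11688) -> list[int]:
--     total_length = max(0, int(total_length))
--     chunk_size = max(1, int(chunk_size))
--     hop_size = max(1, int(hop_size))
--     if total_length <= 0:
--         return []
--     if total_length <= chunk_size:
--         return [0]
--     # number of full-chunk starts, in closed form
--     m = (total_length - chunk_size) // hop_size + 1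
--     # fold the partial tail chunk (if any) into the count
--     count = m + 1 if (m - 1) * hop_size + chunk_size < total_length else m
--     return [i * hop_size for i in range(count)]
-- ===== Notes on version B (the rewrite author's own statement) =====
-- stated objective: simpler
-- what changed: Replaces the condition-checked while loop plus append-tail patch by a closed-form count ((total_length-chunk_size)//hop_size + 1, plus one if a partial tail remains) and a single range comprehension.
import Mathlib
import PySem

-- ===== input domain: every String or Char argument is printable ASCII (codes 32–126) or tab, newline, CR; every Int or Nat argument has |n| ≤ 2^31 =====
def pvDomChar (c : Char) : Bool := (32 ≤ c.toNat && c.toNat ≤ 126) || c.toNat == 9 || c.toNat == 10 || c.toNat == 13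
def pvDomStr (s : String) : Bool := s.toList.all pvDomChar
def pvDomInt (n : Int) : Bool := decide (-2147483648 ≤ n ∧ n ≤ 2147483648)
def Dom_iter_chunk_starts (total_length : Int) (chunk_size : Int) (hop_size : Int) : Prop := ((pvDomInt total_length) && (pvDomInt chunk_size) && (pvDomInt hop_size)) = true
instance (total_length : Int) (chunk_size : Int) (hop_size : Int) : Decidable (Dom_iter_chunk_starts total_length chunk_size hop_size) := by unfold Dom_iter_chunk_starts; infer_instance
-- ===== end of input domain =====

-- B replaces A's condition-checked while loop and tail-append patch by a closed-form
-- start count and a single range comprehension (objective: simpler).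

-- ===== PORT A =====
-- the 'while (pos + chunk_size) <= total_length' loop, accumulating starts;
-- proofs hC, hH carry the normalisation facts needed for termination
def iterChunkLoop (T C H : Int) (hC : 0 < C) (hH : 0 < H) (pos : Int) : List Int :=
  if pos + C ≤ T then pos :: iterChunkLoop T C H hC hH (pos + H) else []
termination_by (T - pos).toNat
decreasing_by omega

-- A's body after the three max-normalisations
def iterChunkBodyA (T C H : Int) (hC : 0 < C) (hH : 0 < H) : List Int :=
  if T ≤ 0 then []
  else if T ≤ C then [0]
  else
    let starts := iterChunkLoop T C H hC hH 0
    match starts.getLast? with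
    | none => []   -- unreachable: T > C ensures the loop appends pos = 0
    | some last => if last + C < T then starts ++ [last + H] else starts

def iter_chunk_starts (total_length : Int) (chunk_size : Int) (hop_size : Int) : List Int :=
  iterChunkBodyA (max 0 total_length) (max 1 chunk_size) (max 1 hop_size) (by omega) (by omega)

-- ===== PORT B =====
-- B's body after the three max-normalisations
def iterChunkBodyB (T C H : Int) : List Int :=
  if T ≤ 0 then []
  else if T ≤ C then [0]
  else
    let m := PySem.Int.floordiv (T - C) H + 1
    let count := if (m - 1) * H + C < T then m + 1 else m
    (PySem.List.pyRange 0 count 1).map (fun i => i * H)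

def iter_chunk_starts_alt (total_length : Int) (chunk_size : Int) (hop_size : Int) : List Int :=
  iterChunkBodyB (max 0 total_length) (max 1 chunk_size) (max 1 hop_size)

-- ===== PRECONDITION & SPEC =====
def Spec_iter_chunk_starts (total_length : Int) (chunk_size : Int) (hop_size : Int) (out : List Int) : Prop := out = iter_chunk_starts_alt total_length chunk_size hop_size
instance (total_length : Int) (chunk_size : Int) (hop_size : Int) (out : List Int) : Decidable (Spec_iter_chunk_starts total_length chunk_size hop_size out) := by unfold Spec_iter_chunk_starts; infer_instance

-- ===== CLAIM (what is proved, stated in full; the proofs are below) =====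
def Claim_equal_iter_chunk_starts : Prop := ∀ (total_length : Int) (chunk_size : Int) (hop_size : Int), Dom_iter_chunk_starts total_length chunk_size hop_size → Spec_iter_chunk_starts total_length chunk_size hop_size (iter_chunk_starts total_length chunk_size hop_size)

-- ===== LEMMAS AND PROOFS =====

-- the loop produces pos, pos+H, …, one start per full chunk; count in closed form via ediv
theorem iterChunkLoop_eq (T C H : Int) (hC : 0 < C) (hH : 0 < H) (pos : Int) :
    iterChunkLoop T C H hC hH pos =
      (List.range ((T - C - pos) / H + 1).toNat).map (fun k : Nat => pos + (k : Int) * H) := by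
  induction pos using iterChunkLoop.induct T C H hC hH with
  | case1 pos h ih =>
    rw [iterChunkLoop, if_pos h, ih]
    have hstep : (T - C - pos) / H = (T - C - (pos + H)) / H + 1 := by
      have he : T - C - pos = (T - C - (pos + H)) + 1 * H := by ring
      rw [he, Int.add_mul_ediv_right _ _ (by omega : H ≠ 0)]
    have h0 : 0 ≤ (T - C - (pos + H)) / H + 1 ∨ (T - C - (pos + H)) / H + 1 ≤ 0 := by omega
    have hn : ((T - C - pos) / H + 1).toNat = ((T - C - (pos + H)) / H + 1).toNat + 1 := by
      have h1 : 0 ≤ (T - C - pos) / H := Int.ediv_nonneg (by omega) (by omega)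
      have h2 : -1 ≤ (T - C - (pos + H)) / H := by omega
      omega
    rw [hn, List.range_succ_eq_map, List.map_cons, List.map_map]
    congr 1
    · simp
    · apply List.map_congr_left; intro k _; simp; ring
  | case2 pos h =>
    rw [iterChunkLoop, if_neg h]
    have hneg : (T - C - pos) / H < 0 := Int.ediv_neg_of_neg_of_pos (by omega) hH
    rw [Int.toNat_of_nonpos (by omega)]
    simp

-- the two bodies agree on normalised arguments
theorem iterChunkBody_eq (T C H : Int) (hC : 0 < C) (hH : 0 < H) :
    iterChunkBodyA T C H hC hH = iterChunkBodyB T C H := by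
  unfold iterChunkBodyA iterChunkBodyB
  by_cases h1 : T ≤ 0
  · simp [h1]
  · rw [if_neg h1, if_neg h1]
    by_cases h2 : T ≤ C
    · rw [if_pos h2, if_pos h2]
    · rw [if_neg h2, if_neg h2]
      rw [iterChunkLoop_eq, PySem.Int.floordiv_eq_ediv_of_pos hH]
      set q : Int := (T - C) / H with hq
      have hq0 : 0 ≤ q := by rw [hq]; exact Int.ediv_nonneg (by omega) (by omega)
      have hn : ((T - C - 0) / H + 1).toNat = (q + 1).toNat := by rw [hq, sub_zero]
      rw [hn]
      have hlast : ((List.range (q + 1).toNat).map (fun k : Nat => 0 + (k : Int) * H)).getLast? =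
          some (0 + (((q + 1).toNat - 1 : Nat) : Int) * H) := by
        rw [List.getLast?_map, List.getLast?_range,
          if_neg (by omega : ¬ (q + 1).toNat = 0)]
        rfl
      simp only [hlast]
      have hqind : (((q + 1).toNat - 1 : Nat) : Int) = q := by omega
      rw [hqind]
      have hpr : ∀ n : Int, 0 ≤ n →
          (PySem.List.pyRange 0 n 1).map (fun i => i * H)
            = (List.range n.toNat).map (fun k : Nat => 0 + (k : Int) * H) := by
        intro n hn0
        rw [PySem.List.pyRange_one, List.map_map, sub_zero]
        apply List.map_congr_left
        intro k _
        simp only [Function.comp_apply]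
        ring
      by_cases h3 : 0 + q * H + C < T
      · rw [if_pos h3, if_pos (by simpa using h3 : (q + 1 - 1) * H + C < T)]
        rw [hpr (q + 1 + 1) (by omega)]
        have hsucc : (q + 1 + 1).toNat = (q + 1).toNat + 1 := by omega
        rw [hsucc, List.range_succ, List.map_append]
        congr 1
        simp only [List.map_cons, List.map_nil]
        congr 1
        have hc : (((q + 1).toNat : Nat) : Int) = q + 1 := by omega
        rw [hc]
        ring
      · rw [if_neg h3, if_neg (by simpa using h3 : ¬ (q + 1 - 1) * H + C < T)]
        rw [hpr (q + 1) (by omega)]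

-- ===== VERDICT (by name: the statement is the Claim_ definition above) =====
theorem iter_chunk_starts_spec : Claim_equal_iter_chunk_starts := by
  intro t c h _
  unfold Spec_iter_chunk_starts iter_chunk_starts iter_chunk_starts_alt
  exact iterChunkBody_eq _ _ _ (by omega) (by omega)
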